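-- pv_equiv track=rewrite | github.com/citp/genealogical-triangulation | python/read_binary_simulation.py | _offsets
-- ===== SOURCE A (Python) =====
-- def _offsets(header):
--     anchor_starts = dict()
--     anchor_unlabeled = dict()
--     current_anchor = None
--     current_offset = 0
--     current_unlabeled = []
--     for anchor, unlabeled in header:
--         if current_anchor is None:
--             current_anchor = anchor
--         if anchor != current_anchor:
--             anchor_starts[current_anchor] = current_offset
--             anchor_unlabeled[current_anchor] = current_unlabeled
--             current_offset += len(current_unlabeled)
--             current_unlabeled = []
--             current_anchor = anchor
--         current_unlabeled.append(unlabeled)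
--     anchor_starts[current_anchor] = current_offset
--     anchor_unlabeled[current_anchor] = current_unlabeled
--     assert len(header) == current_offset + len(current_unlabeled)
--     return (anchor_starts, anchor_unlabeled)
-- ===== SOURCE B (Python) =====
-- def _offsets(header):
--     # Pass 1: materialize the consecutive runs as (anchor, values) pairs.
--     runs = []
--     for anchor, unlabeled in header:
--         if runs and runs[-1][0] == anchor:
--             runs[-1][1].append(unlabeled)
--         else:
--             runs.append((anchor, [unlabeled]))
--     # Pass 2: unlabeled map straight from the runs.
--     anchor_unlabeled = {}
--     for anchor, values in runs:
--         anchor_unlabeled[anchor] = values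
--     # Pass 3: starts map as a prefix sum over the runs' lengths.
--     anchor_starts = {}
--     offset = 0
--     for anchor, values in runs:
--         anchor_starts[anchor] = offset
--         offset += len(values)
--     return (anchor_starts, anchor_unlabeled)
-- ===== Notes on version B (the rewrite author's own statement) =====
-- stated objective: alternative
-- what changed: A interleaves run detection, offset bookkeeping and both dict insertions in one stateful loop; B first materializes the list of consecutive runs, then builds the unlabeled map directly from the runs and the starts map in a separate prefix-sum pass.
-- outside the precondition, e.g. on _offsets([]): A returns ({None: 0}, {None: []}), B returns ({}, {})
import Mathlib
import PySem

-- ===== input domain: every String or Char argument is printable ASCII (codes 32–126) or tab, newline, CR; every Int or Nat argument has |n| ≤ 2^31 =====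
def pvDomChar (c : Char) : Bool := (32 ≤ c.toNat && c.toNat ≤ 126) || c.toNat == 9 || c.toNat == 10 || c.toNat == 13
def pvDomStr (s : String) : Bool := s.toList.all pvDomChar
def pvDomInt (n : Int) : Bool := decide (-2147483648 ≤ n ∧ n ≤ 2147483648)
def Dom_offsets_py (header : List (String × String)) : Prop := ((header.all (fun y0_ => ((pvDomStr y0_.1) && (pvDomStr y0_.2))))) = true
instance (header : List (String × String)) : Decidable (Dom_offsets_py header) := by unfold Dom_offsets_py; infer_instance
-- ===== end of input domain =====

-- B restructures A's single stateful loop as three passes: materialize consecutive runs, then the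
-- unlabeled map from the runs, then the starts map as a separate prefix sum (objective: alternative).
-- A's `assert` always holds and is not ported.

-- ===== PORT A =====
-- loop state: (anchor_starts, anchor_unlabeled, current_anchor, current_offset, current_unlabeled)
def offsetsStateA := PySem.Dict String Int × PySem.Dict String (List String) × Option String × Int × List String

def offsetsStepA (st : offsetsStateA) (p : String × String) : offsetsStateA :=
  let a := st.2.2.1.getD p.1          -- 'if current_anchor is None: current_anchor = anchor'
  if p.1 ≠ a then
    (st.1.insert a st.2.2.2.1, st.2.1.insert a st.2.2.2.2, some p.1,
     st.2.2.2.1 + (st.2.2.2.2.length : Int), [] ++ [p.2])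
  else
    (st.1, st.2.1, some a, st.2.2.2.1, st.2.2.2.2 ++ [p.2])

-- the two insertions after the loop
def offsetsFinishA (s : offsetsStateA) : PySem.Dict String Int × PySem.Dict String (List String) :=
  match s.2.2.1 with
  | some a => (s.1.insert a s.2.2.2.1, s.2.1.insert a s.2.2.2.2)
  | none => (s.1, s.2.1)   -- empty header: Python keys by None, outside the String key type; excluded by Pre_

def offsets_py (header : List (String × String)) : (List (String × Int)) × (List (String × List String)) :=
  let r := offsetsFinishA (header.foldl offsetsStepA (PySem.Dict.empty, PySem.Dict.empty, none, 0, []))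
  (r.1.items, r.2.items)

-- ===== PORT B =====
-- pass 1: runs, extending the last run or appending a fresh one
def offsetsRunsStep (runs : List (String × List String)) (p : String × String) : List (String × List String) :=
  match runs.getLast? with
  | some last => if last.1 = p.1 then runs.dropLast ++ [(last.1, last.2 ++ [p.2])]
                 else runs ++ [(p.1, [p.2])]
  | none => [(p.1, [p.2])]

-- pass 3 state: (anchor_starts, offset)
def offsetsSOStep (st : PySem.Dict String Int × Int) (r : String × List String) :
    PySem.Dict String Int × Int :=
  (st.1.insert r.1 st.2, st.2 + (r.2.length : Int))

def offsets_py_alt (header : List (String × String)) : (List (String × Int)) × (List (String × List String)) :=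
  let runs := header.foldl offsetsRunsStep []
  let unlab := runs.foldl (fun (d : PySem.Dict String (List String)) r => d.insert r.1 r.2) PySem.Dict.empty
  let so := runs.foldl offsetsSOStep (PySem.Dict.empty, 0)
  (so.1.items, unlab.items)

-- ===== PRECONDITION & SPEC =====
-- Pre_ excludes the empty header, on which A returns dicts keyed by None — not a value of the declared
-- String-keyed association-list type; B naturally returns two empty dicts there.
def Pre_offsets_py (header : List (String × String)) : Prop := header ≠ []
instance (header : List (String × String)) : Decidable (Pre_offsets_py header) := by unfold Pre_offsets_py; infer_instance
def pvWitness_offsets_py : (List (String × String)) := [("a", "x")]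

def Spec_offsets_py (header : List (String × String)) (out : (List (String × Int)) × (List (String × List String))) : Prop := out = offsets_py_alt header
instance (header : List (String × String)) (out : (List (String × Int)) × (List (String × List String))) : Decidable (Spec_offsets_py header out) := by unfold Spec_offsets_py; infer_instance

-- ===== CLAIM (what is proved, stated in full; the proofs are below) =====
def Claim_equal_offsets_py : Prop := ∀ (header : List (String × String)), Dom_offsets_py header → Pre_offsets_py header → Spec_offsets_py header (offsets_py header)

-- ===== LEMMAS AND PROOFS =====

-- reference: the runs of l with a run (a, un) currently open
def offsetsRunsFrom (a : String) (un : List String) : List (String × String) → List (String × List String)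
  | [] => [(a, un)]
  | (b, u) :: t => if b = a then offsetsRunsFrom a (un ++ [u]) t
                   else (a, un) :: offsetsRunsFrom b [u] t

-- reference: both result dicts, computed by one recursion over the remaining header
def offsetsRef (a : String) (un : List String) (off : Int) (starts : PySem.Dict String Int)
    (unlab : PySem.Dict String (List String)) : List (String × String) →
    PySem.Dict String Int × PySem.Dict String (List String)
  | [] => (starts.insert a off, unlab.insert a un)
  | (b, u) :: t =>
      if b = a then offsetsRef a (un ++ [u]) off starts unlab t
      else offsetsRef b [u] (off + (un.length : Int)) (starts.insert a off) (unlab.insert a un) t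

theorem offsetsA_eq_ref (l : List (String × String)) : ∀ (a : String) (un : List String) (off : Int)
    (starts : PySem.Dict String Int) (unlab : PySem.Dict String (List String)),
    offsetsFinishA (l.foldl offsetsStepA (starts, unlab, some a, off, un)) =
      offsetsRef a un off starts unlab l := by
  induction l with
  | nil => intro a un off starts unlab; simp [offsetsFinishA, offsetsRef]
  | cons p t ih =>
    intro a un off starts unlab
    obtain ⟨b, u⟩ := p
    by_cases hb : b = a
    · subst hb
      simp only [List.foldl_cons, offsetsStepA, offsetsRef, Option.getD_some, ite_not]
      simp [ih]
    · simp only [List.foldl_cons, offsetsStepA, offsetsRef, Option.getD_some]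
      simp only [hb, if_neg, if_true, ne_eq, not_false_iff]
      simp [ih]

theorem offsetsRuns_eq (l : List (String × String)) : ∀ (done : List (String × List String))
    (a : String) (un : List String),
    l.foldl offsetsRunsStep (done ++ [(a, un)]) = done ++ offsetsRunsFrom a un l := by
  induction l with
  | nil => intro done a un; simp [offsetsRunsFrom]
  | cons p t ih =>
    intro done a un
    obtain ⟨b, u⟩ := p
    have h1 : (done ++ [(a, un)]).getLast? = some (a, un) := by simp
    have h2 : (done ++ [(a, un)]).dropLast = done := by simp
    rw [List.foldl_cons, offsetsRunsStep, h1]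
    by_cases hb : b = a
    · subst hb
      simp only [h2, offsetsRunsFrom, ite_true]
      exact ih done b (un ++ [u])
    · simp only [Ne.symm hb, ite_false, offsetsRunsFrom, hb]
      rw [show done ++ [(a, un)] ++ [(b, [u])] = (done ++ [(a, un)]) ++ [(b, [u])] from rfl]
      rw [ih (done ++ [(a, un)]) b [u]]
      simp

theorem offsetsB_eq_ref (l : List (String × String)) : ∀ (a : String) (un : List String) (off : Int)
    (starts : PySem.Dict String Int) (unlab : PySem.Dict String (List String)),
    (((offsetsRunsFrom a un l).foldl offsetsSOStep (starts, off)).1,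
      (offsetsRunsFrom a un l).foldl (fun (d : PySem.Dict String (List String)) r => d.insert r.1 r.2) unlab) =
      offsetsRef a un off starts unlab l := by
  induction l with
  | nil => intro a un off starts unlab; simp [offsetsRunsFrom, offsetsSOStep, offsetsRef]
  | cons p t ih =>
    intro a un off starts unlab
    obtain ⟨b, u⟩ := p
    by_cases hb : b = a
    · subst hb
      simp only [offsetsRunsFrom, offsetsRef, ite_true]
      exact ih b (un ++ [u]) off starts unlab
    · simp only [offsetsRunsFrom, offsetsRef, hb, ite_false, List.foldl_cons, offsetsSOStep]
      exact ih b [u] (off + (un.length : Int)) (starts.insert a off) (unlab.insert a un)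

-- ===== VERDICT (by name: the statement is the Claim_ definition above) =====
theorem offsets_py_spec : Claim_equal_offsets_py := by
  intro header _ hpre
  unfold Spec_offsets_py
  match header with
  | [] => exact absurd rfl hpre
  | (a, u) :: t =>
    unfold offsets_py offsets_py_alt
    have step1 : offsetsStepA (PySem.Dict.empty, PySem.Dict.empty, none, 0, []) (a, u) =
        (PySem.Dict.empty, PySem.Dict.empty, some a, 0, [u]) := by
      simp [offsetsStepA]
    have runs1 : offsetsRunsStep [] (a, u) = ([] : List (String × List String)) ++ [(a, [u])] := by
      simp [offsetsRunsStep]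
    rw [List.foldl_cons, List.foldl_cons, step1, runs1, offsetsRuns_eq t [] a [u], List.nil_append]
    rw [offsetsA_eq_ref t a [u] 0 PySem.Dict.empty PySem.Dict.empty]
    rw [← offsetsB_eq_ref t a [u] 0 PySem.Dict.empty PySem.Dict.empty]
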